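-- pv_equiv track=rewrite | github.com/tersec/archive-diff | treediff.py | get_hashlist_path_prefixes
-- ===== SOURCE A (Python) =====
-- def get_hashlist_paths(hashlist):
--     from itertools import chain
--
--     return frozenset(chain.from_iterable(hashlist.values()))
--
-- def get_hashlist_path_prefixes(hashlist):
--     from itertools import chain
--
--     return frozenset(
--         chain.from_iterable(
--             (
--                 (tuple(path[:i]) for i in range(len(path)))
--                 for path in get_hashlist_paths(hashlist)
--             )
--         )
--     )
-- ===== SOURCE B (Python) =====
-- def get_hashlist_path_prefixes(hashlist):
--     prefixes = set()
--     for paths in hashlist.values():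
--         for path in paths:
--             prefix = ()
--             for x in path:
--                 prefixes.add(prefix)
--                 prefix = prefix + (x,)
--     return frozenset(prefixes)
-- ===== Notes on version B (the rewrite author's own statement) =====
-- stated objective: simpler
-- what changed: Instead of deduplicating paths into a frozenset and then generating each prefix by slicing path[:i] over range(len(path)), B walks every path once with a running prefix tuple extended element by element, adding each intermediate prefix directly to one set; no intermediate path set and no slicing.
import Mathlib
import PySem

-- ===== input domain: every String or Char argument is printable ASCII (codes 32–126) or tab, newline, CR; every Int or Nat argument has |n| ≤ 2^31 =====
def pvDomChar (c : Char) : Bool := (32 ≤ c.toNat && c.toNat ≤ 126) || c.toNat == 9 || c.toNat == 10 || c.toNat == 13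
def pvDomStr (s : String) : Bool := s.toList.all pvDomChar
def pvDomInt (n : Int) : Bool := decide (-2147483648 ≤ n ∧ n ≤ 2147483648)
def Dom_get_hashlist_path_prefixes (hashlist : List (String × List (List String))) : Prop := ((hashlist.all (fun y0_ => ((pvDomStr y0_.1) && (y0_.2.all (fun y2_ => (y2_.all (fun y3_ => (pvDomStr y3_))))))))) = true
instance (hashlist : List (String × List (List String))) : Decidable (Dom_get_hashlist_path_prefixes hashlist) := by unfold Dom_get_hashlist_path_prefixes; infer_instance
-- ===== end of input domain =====

-- B replaces A's slice-per-index comprehension over a deduplicated path set by one incremental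
-- walk of every path with a running prefix added to a single set (simpler; same cost).

-- ===== PORT A =====
def get_hashlist_paths (hashlist : List (String × List (List String))) : List (List String) :=
  PySem.Set.ofList ((hashlist.map (fun kv => kv.2)).flatten)

def get_hashlist_path_prefixes (hashlist : List (String × List (List String))) : List (List String) :=
  PySem.Set.ofList ((get_hashlist_paths hashlist).flatMap (fun path =>
    (PySem.List.pyRange 0 (path.length : Int) 1).map (fun i => PySem.List.slice path none (some i))))

-- ===== PORT B =====
def get_hashlist_path_prefixes_alt (hashlist : List (String × List (List String))) : List (List String) :=
  hashlist.foldl (fun prefixes kv =>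
    kv.2.foldl (fun prefixes path =>
      (path.foldl (fun (sp : PySem.Set (List String) × List String) x =>
        (PySem.Set.add sp.1 sp.2, sp.2 ++ [x])) (prefixes, ([] : List String))).1)
      prefixes) PySem.Set.empty

-- ===== PRECONDITION & SPEC =====
def Spec_get_hashlist_path_prefixes (hashlist : List (String × List (List String))) (out : List (List String)) : Prop := out = get_hashlist_path_prefixes_alt hashlist
instance (hashlist : List (String × List (List String))) (out : List (List String)) : Decidable (Spec_get_hashlist_path_prefixes hashlist out) := by unfold Spec_get_hashlist_path_prefixes; infer_instance

-- ===== CLAIM (what is proved, stated in full; the proofs are below) =====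
def Claim_equal_get_hashlist_path_prefixes : Prop := ∀ (hashlist : List (String × List (List String))), Dom_get_hashlist_path_prefixes hashlist → Spec_get_hashlist_path_prefixes hashlist (get_hashlist_path_prefixes hashlist)

-- ===== LEMMAS AND PROOFS =====

-- A's per-path prefix list is the list of takes.
lemma prefixList_eq (path : List String) :
    (PySem.List.pyRange 0 (path.length : Int) 1).map (fun i => PySem.List.slice path none (some i))
      = (List.range path.length).map (fun k => path.take k) := by
  rw [PySem.List.pyRange_one]
  simp [List.map_map, Function.comp_def, PySem.List.slice_to_natCast]

-- B's inner running-prefix fold is a fold of Set.add over the prefixes (shifted by p).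
lemma inner_fold_eq (path : List String) (s : PySem.Set (List String)) (p : List String) :
    (path.foldl (fun (sp : PySem.Set (List String) × List String) x =>
        (PySem.Set.add sp.1 sp.2, sp.2 ++ [x])) (s, p)).1
      = ((List.range path.length).map (fun k => p ++ path.take k)).foldl PySem.Set.add s := by
  induction path generalizing s p with
  | nil => rfl
  | cons x t ih =>
    simp only [List.foldl_cons, List.length_cons, List.range_succ_eq_map, List.map_cons,
      List.map_map]
    rw [ih]
    simp [Function.comp_def, List.append_assoc]

-- update by a list whose elements are already members is the identity.
lemma update_of_subset {β : Type} [BEq β] [LawfulBEq β] (s : PySem.Set β) (l : List β)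
    (h : ∀ y ∈ l, y ∈ s) : PySem.Set.update s l = s := by
  rw [PySem.Set.update_eq_append_filter]
  have : (PySem.Set.ofList l).filter (fun y => !(PySem.Set.contains s y)) = [] := by
    rw [List.filter_eq_nil_iff]
    intro y hy
    have : y ∈ s := h y ((PySem.Set.mem_ofList _ _).1 hy)
    simp [PySem.Set.contains_eq_listContains, this]
  rw [this, List.append_nil]

-- deduplicating before flat-mapping does not change the resulting set.
lemma ofList_flatMap_ofList {α β : Type} [BEq α] [LawfulBEq α] [BEq β] [LawfulBEq β]
    (f : α → List β) (xs : List α) :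
    PySem.Set.ofList ((PySem.Set.ofList xs).flatMap f) = PySem.Set.ofList (xs.flatMap f) := by
  induction xs using List.reverseRecOn with
  | nil => rfl
  | append_singleton xs x ih =>
    rw [PySem.Set.ofList_append_singleton]
    by_cases hx : x ∈ xs
    · rw [PySem.Set.add_of_mem ((PySem.Set.mem_ofList _ _).2 hx), ih,
        List.flatMap_append, PySem.Set.ofList_append]
      refine (update_of_subset _ _ ?_).symm
      intro y hy
      simp only [List.flatMap_cons, List.flatMap_nil, List.append_nil] at hy
      exact (PySem.Set.mem_ofList _ _).2 (List.mem_flatMap.2 ⟨x, hx, hy⟩)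
    · rw [PySem.Set.add_of_not_mem (fun h => hx ((PySem.Set.mem_ofList _ _).1 h)),
        List.flatMap_append, List.flatMap_append, PySem.Set.ofList_append,
        PySem.Set.ofList_append, ih]

-- folding Set.add over a flatMap equals the nested fold.
lemma foldl_add_flatMap {α β : Type} [BEq β] [LawfulBEq β] (f : α → List β)
    (xs : List α) (s : PySem.Set β) :
    (xs.flatMap f).foldl PySem.Set.add s
      = xs.foldl (fun s x => (f x).foldl PySem.Set.add s) s := by
  rw [List.flatMap, List.foldl_flatten, List.foldl_map]

-- ===== VERDICT (by name: the statement is the Claim_ definition above) =====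
theorem get_hashlist_path_prefixes_spec : Claim_equal_get_hashlist_path_prefixes := by
  intro hashlist _
  unfold Spec_get_hashlist_path_prefixes get_hashlist_path_prefixes get_hashlist_paths
    get_hashlist_path_prefixes_alt
  -- rewrite A
  have hA : PySem.Set.ofList
      ((PySem.Set.ofList ((hashlist.map (fun kv => kv.2)).flatten)).flatMap (fun path =>
        (PySem.List.pyRange 0 (path.length : Int) 1).map (fun i => PySem.List.slice path none (some i))))
      = PySem.Set.ofList
        (((hashlist.map (fun kv => kv.2)).flatten).flatMap (fun path =>
          (List.range path.length).map (fun k => path.take k))) := by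
    simp only [prefixList_eq]
    exact ofList_flatMap_ofList _ _
  rw [hA]
  -- rewrite B
  have hB : ∀ (kvs : List (String × List (List String))) (s : PySem.Set (List String)),
      kvs.foldl (fun prefixes kv =>
        kv.2.foldl (fun prefixes path =>
          (path.foldl (fun (sp : PySem.Set (List String) × List String) x =>
            (PySem.Set.add sp.1 sp.2, sp.2 ++ [x])) (prefixes, ([] : List String))).1)
          prefixes) s
      = (((kvs.map (fun kv => kv.2)).flatten).flatMap (fun path =>
          (List.range path.length).map (fun k => path.take k))).foldl PySem.Set.add s := by
    intro kvs s
    rw [foldl_add_flatMap, List.foldl_flatten, List.foldl_map]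
    apply PySem.List.foldl_congr_mem
    intro acc kv _
    apply PySem.List.foldl_congr_mem
    intro acc2 path _
    rw [inner_fold_eq]
    simp
  rw [hB, PySem.Set.ofList_eq_foldl]
  rfl
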